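-- pv_equiv track=rewrite | github.com/njunius/Puppitor | tools/test_helper.py | find_all_affect_changes
-- ===== SOURCE A (Python) =====
-- import collections
--
-- delta_info = collections.namedtuple('delta_info', ['count', 'init_affect', 'prev_affect', 'curr_affect', 'curr_action', 'curr_mod'])
--
-- def find_all_affect_changes(path):
--     start_node = path[0]
--     init_affect = start_node[3]
--     prev_affect = init_affect
--     prev_action = start_node[1]
--     prev_mod = start_node[2]
--     count = 0
--     curr_affect = None
--
--     affect_changes = []
--
--     for node in path:
--         curr_action = node[1]
--         curr_mod = node[2]
--         curr_affect = node[3]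
--         if curr_affect != prev_affect:
--             temp_node = delta_info._make((count, init_affect, prev_affect, curr_affect, curr_action, curr_mod))
--             affect_changes.append(temp_node)
--             prev_affect = curr_affect
--             prev_action = curr_action
--             prev_mod = curr_mod
--
--         elif curr_action != prev_action or curr_mod != prev_mod:
--             temp_node = delta_info._make((count, init_affect, prev_affect, curr_affect, curr_action, curr_mod))
--             affect_changes.append(temp_node)
--             prev_affect = curr_affect
--             prev_action = curr_action
--             prev_mod = curr_mod
--
--         count += 1
--
--     return affect_changes
-- ===== SOURCE B (Python) =====
-- import collections
-- from itertools import groupby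
--
-- delta_info = collections.namedtuple('delta_info', ['count', 'init_affect', 'prev_affect', 'curr_affect', 'curr_action', 'curr_mod'])
--
-- def find_all_affect_changes(path):
--     # Stage 1: run-length encode the path by its (action, mod, affect) triple.
--     groups = [(key, sum(1 for _ in run))
--               for key, run in groupby(path, key=lambda n: (n[1], n[2], n[3]))]
--     if not groups:
--         return []
--     init_affect = path[0][3]
--     # Stage 2: each boundary between consecutive runs is one change record;
--     # its index is the cumulative length of the runs before it.
--     changes = []
--     i = groups[0][1]
--     for (prev_key, _), ((act, mod, aff), length) in zip(groups, groups[1:]):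
--         changes.append(delta_info._make((i, init_affect, prev_key[2], aff, act, mod)))
--         i += length
--     return changes
-- ===== Notes on version B (the rewrite author's own statement) =====
-- stated objective: alternative
-- what changed: B replaces A's stateful single pass by two stages: it first run-length encodes the path into maximal runs of equal (action, mod, affect) triples with itertools.groupby, then emits one change record per boundary between consecutive runs, with the index recovered as the cumulative sum of the preceding run lengths.
-- crash fix: On the empty path A raises IndexError (path[0]); B finds no runs and returns []. — e.g. on find_all_affect_changes([]): A raises IndexError, B returns []
import Mathlib
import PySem

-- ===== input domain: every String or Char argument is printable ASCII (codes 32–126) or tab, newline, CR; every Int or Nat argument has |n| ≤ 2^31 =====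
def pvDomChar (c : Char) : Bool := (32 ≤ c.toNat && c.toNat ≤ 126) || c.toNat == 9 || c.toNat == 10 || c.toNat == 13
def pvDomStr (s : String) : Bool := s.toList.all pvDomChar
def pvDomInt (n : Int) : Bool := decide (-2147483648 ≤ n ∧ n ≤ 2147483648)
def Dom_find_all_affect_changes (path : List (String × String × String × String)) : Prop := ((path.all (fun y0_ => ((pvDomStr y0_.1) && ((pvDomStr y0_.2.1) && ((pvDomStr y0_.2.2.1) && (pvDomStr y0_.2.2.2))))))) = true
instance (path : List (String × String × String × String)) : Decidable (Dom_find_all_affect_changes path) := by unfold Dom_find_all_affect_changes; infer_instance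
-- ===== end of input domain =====

-- B replaces A's stateful single pass by two stages (run-length encode the path by its
-- (action, mod, affect) triple, then emit one record per run boundary); same O(n) cost.
-- The equivalence is about the return value only (neither program mutates its argument).

-- ===== PORT A =====
-- loop body of A: state = (prev_affect, prev_action, prev_mod, count, affect_changes)
def faStep (init_affect : String)
    (st : String × String × String × Int × List (Int × String × String × String × String × String))
    (node : String × String × String × String) :
    String × String × String × Int × List (Int × String × String × String × String × String) :=
  let (prev_affect, prev_action, prev_mod, count, acc) := st
  let curr_action := node.2.1
  let curr_mod := node.2.2.1
  let curr_affect := node.2.2.2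
  if curr_affect ≠ prev_affect then
    (curr_affect, curr_action, curr_mod, count + 1,
      acc ++ [(count, init_affect, prev_affect, curr_affect, curr_action, curr_mod)])
  else if curr_action ≠ prev_action ∨ curr_mod ≠ prev_mod then
    (curr_affect, curr_action, curr_mod, count + 1,
      acc ++ [(count, init_affect, prev_affect, curr_affect, curr_action, curr_mod)])
  else
    (prev_affect, prev_action, prev_mod, count + 1, acc)

def find_all_affect_changes (path : List (String × String × String × String)) : List (Int × String × String × String × String × String) :=
  match PySem.List.pyGet? path 0 with
  | none => []  -- empty path: Python raises IndexError here (excluded by Pre_)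
  | some start_node =>
    let init_affect := start_node.2.2.2
    (path.foldl (faStep init_affect) (init_affect, start_node.2.1, start_node.2.2.1, 0, [])).2.2.2.2

-- ===== PORT B =====
-- the groupby key (n[1], n[2], n[3])
def fbKey (n : String × String × String × String) : String × String × String :=
  (n.2.1, n.2.2.1, n.2.2.2)

-- itertools.groupby with run lengths: maximal runs of equal keys, in order
def fbRleAux (k : String × String × String) (c : Int) :
    List (String × String × String × String) → List ((String × String × String) × Int)
  | [] => [(k, c)]
  | n :: rest =>
    if fbKey n = k then fbRleAux k (c + 1) rest
    else (k, c) :: fbRleAux (fbKey n) 1 rest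

-- Source B's zip(groups, groups[1:]) loop, carrying the cumulative index i
def fbEmit (init_affect : String) (i : Int) :
    List ((String × String × String) × Int) → List (Int × String × String × String × String × String)
  | g0 :: g1 :: rest =>
    (i, init_affect, g0.1.2.2, g1.1.2.2, g1.1.1, g1.1.2.1) :: fbEmit init_affect (i + g1.2) (g1 :: rest)
  | _ => []

def find_all_affect_changes_alt (path : List (String × String × String × String)) : List (Int × String × String × String × String × String) :=
  match path with
  | [] => []  -- groups == [], Source B returns []
  | p :: l =>
    match fbRleAux (fbKey p) 1 l with
    | [] => []  -- unreachable: fbRleAux never returns []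
    | g0 :: gs => fbEmit p.2.2.2 g0.2 (g0 :: gs)

-- ===== PRECONDITION & SPEC =====
-- A raises IndexError on the empty path (path[0]); Pre_ excludes exactly that.
def Pre_find_all_affect_changes (path : List (String × String × String × String)) : Prop := path ≠ []
instance (path : List (String × String × String × String)) : Decidable (Pre_find_all_affect_changes path) := by unfold Pre_find_all_affect_changes; infer_instance
def pvWitness_find_all_affect_changes : (List (String × String × String × String)) :=
  [("n0", "act", "mod", "calm"), ("n1", "act", "mod", "joy")]

-- On the empty path A raises IndexError (path[0]); B finds no runs and returns [].
def Raises_find_all_affect_changes (path : List (String × String × String × String)) : Prop := path = []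
instance (path : List (String × String × String × String)) : Decidable (Raises_find_all_affect_changes path) := by unfold Raises_find_all_affect_changes; infer_instance
def pvRaiseWitness_find_all_affect_changes : (List (String × String × String × String)) := []
def pvRaiseWitnessOut_find_all_affect_changes : List (Int × String × String × String × String × String) := []

def Spec_find_all_affect_changes (path : List (String × String × String × String)) (out : List (Int × String × String × String × String × String)) : Prop := out = find_all_affect_changes_alt path
instance (path : List (String × String × String × String)) (out : List (Int × String × String × String × String × String)) : Decidable (Spec_find_all_affect_changes path out) := by unfold Spec_find_all_affect_changes; infer_instance

-- ===== CLAIM =====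
def Claim_equal_find_all_affect_changes : Prop := ∀ (path : List (String × String × String × String)), Dom_find_all_affect_changes path → Pre_find_all_affect_changes path → Spec_find_all_affect_changes path (find_all_affect_changes path)
def Claim_raises_find_all_affect_changes : Prop := (∀ (path : List (String × String × String × String)), Dom_find_all_affect_changes path → Raises_find_all_affect_changes path → ¬ Pre_find_all_affect_changes path) ∧ (Dom_find_all_affect_changes (pvRaiseWitness_find_all_affect_changes) ∧ Raises_find_all_affect_changes (pvRaiseWitness_find_all_affect_changes) ∧ find_all_affect_changes_alt (pvRaiseWitness_find_all_affect_changes) = pvRaiseWitnessOut_find_all_affect_changes)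

-- ===== LEMMAS AND PROOFS =====

-- proof-only middle form: A's pass expressed on keys (the state A keeps is exactly
-- the key of the last node), used to bridge A's fold and B's run-length encoding
def fbKeys (init : String) (i : Int) (k : String × String × String) :
    List (String × String × String × String) → List (Int × String × String × String × String × String)
  | [] => []
  | n :: rest =>
    (if fbKey n ≠ k then [(i, init, k.2.2, n.2.2.2, n.2.1, n.2.2.1)] else [])
      ++ fbKeys init (i + 1) (fbKey n) rest

-- length of the leading run of key k
def fbLrun (k : String × String × String) : List (String × String × String × String) → Int
  | [] => 0
  | n :: rest => if fbKey n = k then 1 + fbLrun k rest else 0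

-- the rest of the encoding after the leading run
def fbTail (k : String × String × String) :
    List (String × String × String × String) → List ((String × String × String) × Int)
  | [] => []
  | n :: rest => if fbKey n = k then fbTail k rest else fbRleAux (fbKey n) 1 rest

theorem fbRleAux_eq (k : String × String × String) :
    ∀ (l : List (String × String × String × String)) (c : Int),
      fbRleAux k c l = (k, c + fbLrun k l) :: fbTail k l := by
  intro l
  induction l generalizing k with
  | nil => intro c; simp [fbRleAux, fbLrun, fbTail]
  | cons n rest ih =>
    intro c
    by_cases h : fbKey n = k
    · simp only [fbRleAux, fbLrun, fbTail, h, if_true]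
      rw [ih k (c + 1)]
      ring_nf
    · simp [fbRleAux, fbLrun, fbTail, h]

-- A's loop invariant: from a state equal to key k at count i, the rest of A's fold
-- appends exactly the key-pass records
theorem fa_loop_inv (init : String) :
    ∀ (l : List (String × String × String × String)) (k : String × String × String)
      (i : Int) (acc : List (Int × String × String × String × String × String)),
      (l.foldl (faStep init) (k.2.2, k.1, k.2.1, i, acc)).2.2.2.2
        = acc ++ fbKeys init i k l := by
  intro l
  induction l with
  | nil => intro k i acc; simp [fbKeys]
  | cons node rest ih =>
    intro k i acc
    by_cases haf : node.2.2.2 = k.2.2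
    · by_cases hac : node.2.1 = k.1
      · by_cases hmo : node.2.2.1 = k.2.1
        · -- no change: keys equal
          simp only [List.foldl, faStep, haf, hac, hmo, ne_eq, not_true_eq_false, or_self, if_false]
          have h2 : (rest.foldl (faStep init) (k.2.2, k.1, k.2.1, i + 1, acc)).2.2.2.2
              = (rest.foldl (faStep init) ((fbKey node).2.2, (fbKey node).1, (fbKey node).2.1, i + 1, acc)).2.2.2.2 := by
            simp [fbKey, haf, hac, hmo]
          rw [h2, ih (fbKey node) (i + 1) acc]
          simp [fbKeys, fbKey, haf, hac, hmo]
        · simp only [List.foldl, faStep, haf, hac, hmo, ne_eq, not_true_eq_false,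
            not_false_eq_true, or_true, if_false, if_true]
          have key := ih (fbKey node) (i + 1)
            (acc ++ [(i, init, k.2.2, node.2.2.2, node.2.1, node.2.2.1)])
          simp only [fbKey] at key
          rw [haf, hac] at key
          rw [key]
          simp [fbKeys, fbKey, Prod.ext_iff, haf, hac, hmo, List.append_assoc]
      · simp only [List.foldl, faStep, haf, hac, ne_eq, not_true_eq_false,
          not_false_eq_true, true_or, if_false, if_true]
        have key := ih (fbKey node) (i + 1)
          (acc ++ [(i, init, k.2.2, node.2.2.2, node.2.1, node.2.2.1)])
        simp only [fbKey] at key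
        rw [haf] at key
        rw [key]
        simp [fbKeys, fbKey, Prod.ext_iff, haf, hac, List.append_assoc]
    · simp only [List.foldl, faStep, haf, ne_eq, not_false_eq_true, if_true]
      have key := ih (fbKey node) (i + 1)
        (acc ++ [(i, init, k.2.2, node.2.2.2, node.2.1, node.2.2.1)])
      simp only [fbKey] at key
      rw [key]
      simp [fbKeys, fbKey, Prod.ext_iff, haf, List.append_assoc]

-- B's stages compose to the key pass: emitting over the run-length encoding,
-- started at the index just past the leading run, is the key pass
theorem fb_main (init : String) :
    ∀ (l : List (String × String × String × String)) (k : String × String × String)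
      (i c : Int),
      fbEmit init (i + fbLrun k l) (fbRleAux k c l) = fbKeys init i k l := by
  intro l
  induction l with
  | nil => intro k i c; simp [fbRleAux, fbLrun, fbKeys, fbEmit]
  | cons n rest ih =>
    intro k i c
    by_cases h : fbKey n = k
    · simp only [fbRleAux, fbLrun, fbKeys, h, if_true, ne_eq, not_true_eq_false,
        ite_false, List.nil_append]
      have : i + (1 + fbLrun k rest) = (i + 1) + fbLrun k rest := by ring
      rw [this, ih k (i + 1) (c + 1)]
    · simp only [fbRleAux, fbLrun, fbKeys, h, if_false, ne_eq, not_false_eq_true, ite_true]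
      rw [fbRleAux_eq (fbKey n) rest 1]
      simp only [fbEmit]
      have h1 : i + (0 : Int) = i := by ring
      have h2 : i + (1 + fbLrun (fbKey n) rest) = (i + 1) + fbLrun (fbKey n) rest := by ring
      rw [h1, h2, ← fbRleAux_eq (fbKey n) rest 1, ih (fbKey n) (i + 1) 1]
      simp [fbKey]

-- ===== VERDICT =====
theorem find_all_affect_changes_spec : Claim_equal_find_all_affect_changes := by
  intro path _hdom hpre
  unfold Spec_find_all_affect_changes
  match path with
  | [] => exact absurd rfl hpre
  | p :: l =>
    show find_all_affect_changes (p :: l) = _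
    unfold find_all_affect_changes find_all_affect_changes_alt
    simp only [PySem.List.pyGet?, PySem.List.pyIdx?]
    norm_num
    -- A's side: first iteration has node = p, state = p's own key, no record
    simp only [faStep, ne_eq, not_true_eq_false, or_self, ite_false]
    have ha : (l.foldl (faStep p.2.2.2) (p.2.2.2, p.2.1, p.2.2.1, 1, [])).2.2.2.2
        = fbKeys p.2.2.2 1 (fbKey p) l := by
      have := fa_loop_inv p.2.2.2 l (fbKey p) 1 []
      simpa [fbKey] using this
    -- B's side: unfold the head group and apply the stage-composition lemma
    simp only [zero_add]
    rw [ha, fbRleAux_eq (fbKey p) l 1]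
    have hb := fb_main p.2.2.2 l (fbKey p) 1 1
    rw [fbRleAux_eq (fbKey p) l 1] at hb
    exact hb.symm

@[simp] theorem find_all_affect_changes_raises : Claim_raises_find_all_affect_changes := by
  unfold Claim_raises_find_all_affect_changes
  exact ⟨fun path _ h => by simp [Raises_find_all_affect_changes] at h; simp [h, Pre_find_all_affect_changes], by decide⟩
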